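-- pv_equiv track=rewrite | github.com/nonaninona/algorithm | 백준/Gold/21758. 꿀 따기/꿀 따기.py | solve
-- ===== SOURCE A (Python) =====
-- def solve(N, honeys):
--     # 꿀통 좌우에 벌을 둘 때
--     ret1 = sum(honeys[1:-1]) + max(honeys[1:-1])
--     # 꿀통 오른쪽에만 벌을 둘 떄
--     first = sum(honeys[:-1])
--     second = 0
--     ret2 = 0
--     for i in range(1, N-1):
--         second += honeys[i-1]
--         t = first + second - honeys[i]
--         if t > ret2:
--             ret2 = t
--     # 꿀통 왼쪽에만 벌을 둘 때
--     first = sum(honeys[1:])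
--     second = 0
--     ret3 = 0
--     for i in range(N-2, 0, -1):
--         second += honeys[i+1]
--         t = first + second - honeys[i]
--         if t > ret3:
--             ret3 = t
--
--     return max(ret1, ret2, ret3)
-- ===== SOURCE B (Python) =====
-- def solve(N, honeys):
--     mid = honeys[1:-1]
--     ret1 = sum(mid) + max(mid)
--     P = [0]
--     for h in honeys:
--         P.append(P[-1] + h)
--     L = len(honeys)
--     ret2 = max([0] + [P[L - 1] + P[i] - honeys[i] for i in range(1, N - 1)])
--     ret3 = max([0] + [(P[L] - honeys[0]) + (P[N] - P[i + 1]) - honeys[i]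
--                       for i in range(1, N - 1)])
--     return max(ret1, ret2, ret3)
-- ===== Notes on version B (the rewrite author's own statement) =====
-- stated objective: simpler
-- what changed: B builds one prefix-sum table P in a single pass and computes both one-sided answers as max over closed-form lookups P[L-1]+P[i]-h[i] and (P[L]-h[0])+(P[N]-P[i+1])-h[i], replacing A's two stateful incremental-accumulator loops (one of them iterating backwards) with direct table queries.
import Mathlib
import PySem

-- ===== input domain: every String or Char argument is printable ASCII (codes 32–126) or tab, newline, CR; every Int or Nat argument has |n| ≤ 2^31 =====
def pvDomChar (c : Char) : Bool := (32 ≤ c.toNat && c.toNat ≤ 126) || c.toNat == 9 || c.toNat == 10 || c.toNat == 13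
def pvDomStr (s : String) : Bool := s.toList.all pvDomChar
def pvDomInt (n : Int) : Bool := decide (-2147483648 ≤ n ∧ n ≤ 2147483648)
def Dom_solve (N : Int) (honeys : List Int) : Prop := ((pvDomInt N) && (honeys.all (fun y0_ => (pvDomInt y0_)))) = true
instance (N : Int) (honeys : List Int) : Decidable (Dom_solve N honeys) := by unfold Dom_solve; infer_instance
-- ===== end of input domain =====

-- B replaces A's two incremental accumulation loops by one prefix-sum table queried in two comprehensions (objective: simpler).


-- ===== PORT A =====
-- the body of A's first loop: second += honeys[i-1]; t = first + second - honeys[i]; if t > ret: ret = t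
def solveStep2 (first : Int) (honeys : List Int) (st : Int × Int) (i : Int) : Int × Int :=
  let second := st.1 + PySem.List.pyGetD honeys (i - 1) 0
  let t := first + second - PySem.List.pyGetD honeys i 0
  (second, if st.2 < t then t else st.2)

-- the body of A's second loop: second += honeys[i+1]; t = first + second - honeys[i]; if t > ret: ret = t
def solveStep3 (first : Int) (honeys : List Int) (st : Int × Int) (i : Int) : Int × Int :=
  let second := st.1 + PySem.List.pyGetD honeys (i + 1) 0
  let t := first + second - PySem.List.pyGetD honeys i 0
  (second, if st.2 < t then t else st.2)

def solve (N : Int) (honeys : List Int) : Int :=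
  let mid := PySem.List.slice honeys (some 1) (some (-1))
  let ret1 := mid.sum + (PySem.List.max? mid (fun x => x)).getD 0
  let first := (PySem.List.slice honeys none (some (-1))).sum
  let ret2 := ((PySem.List.pyRange 1 (N - 1) 1).foldl (solveStep2 first honeys) (0, 0)).2
  let first' := (PySem.List.slice honeys (some 1) none).sum
  let ret3 := ((PySem.List.pyRange (N - 2) 0 (-1)).foldl (solveStep3 first' honeys) (0, 0)).2
  max (max ret1 ret2) ret3

-- ===== PORT B =====
-- P = [0]; for h in honeys: P.append(P[-1] + h)
def prefixSums (honeys : List Int) : List Int :=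
  honeys.foldl (fun acc h => acc ++ [PySem.List.pyGetD acc (-1) 0 + h]) [0]

def solve_alt (N : Int) (honeys : List Int) : Int :=
  let mid := PySem.List.slice honeys (some 1) (some (-1))
  let ret1 := mid.sum + (PySem.List.max? mid (fun x => x)).getD 0
  let P := prefixSums honeys
  let L : Int := honeys.length
  let ret2 := (PySem.List.max? ((0 : Int) :: (PySem.List.pyRange 1 (N - 1) 1).map (fun i =>
      PySem.List.pyGetD P (L - 1) 0 + PySem.List.pyGetD P i 0 - PySem.List.pyGetD honeys i 0)) (fun x => x)).getD 0
  let ret3 := (PySem.List.max? ((0 : Int) :: (PySem.List.pyRange 1 (N - 1) 1).map (fun i =>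
      (PySem.List.pyGetD P L 0 - PySem.List.pyGetD honeys 0 0)
        + (PySem.List.pyGetD P N 0 - PySem.List.pyGetD P (i + 1) 0)
        - PySem.List.pyGetD honeys i 0)) (fun x => x)).getD 0
  max (max ret1 ret2) ret3

-- ===== PRECONDITION & SPEC =====
-- Pre_ excludes exactly the inputs where A raises: len(honeys) < 3 (ValueError from max over the empty
-- slice honeys[1:-1]) or N > len(honeys) (IndexError in the loops); A returns on everything else.
def Pre_solve (N : Int) (honeys : List Int) : Prop :=
  3 ≤ honeys.length ∧ N ≤ (honeys.length : Int)
instance (N : Int) (honeys : List Int) : Decidable (Pre_solve N honeys) := by unfold Pre_solve; infer_instance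

def pvWitness_solve : Int × List Int := (4, [1, 2, 3, 4])

def Spec_solve (N : Int) (honeys : List Int) (out : Int) : Prop := out = solve_alt N honeys
instance (N : Int) (honeys : List Int) (out : Int) : Decidable (Spec_solve N honeys out) := by unfold Spec_solve; infer_instance

-- ===== CLAIM (what is proved, stated in full; the proofs are below) =====
def Claim_equal_solve : Prop := ∀ (N : Int) (honeys : List Int), Dom_solve N honeys → Pre_solve N honeys → Spec_solve N honeys (solve N honeys)

-- ===== LEMMAS AND PROOFS =====

-- prefix sum of the first k entries
def pvS (honeys : List Int) (k : Nat) : Int := (honeys.take k).sum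

theorem pvS_succ (honeys : List Int) (k : Nat) (hk : k < honeys.length) :
    pvS honeys (k + 1) = pvS honeys k + PySem.List.pyGetD honeys (k : Int) 0 := by
  rw [PySem.List.pyGetD_natCast, List.getD_eq_getElem honeys 0 hk]
  exact List.sum_take_succ honeys k hk

theorem foldP : ∀ (l acc : List Int), acc ≠ [] →
    l.foldl (fun a h => a ++ [PySem.List.pyGetD a (-1) 0 + h]) acc
      = acc ++ (List.range l.length).map (fun k => PySem.List.pyGetD acc (-1) 0 + (l.take (k+1)).sum) := by
  intro l
  induction l with
  | nil => intro acc h; simp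
  | cons x xs ih =>
    intro acc h
    simp only [List.foldl_cons]
    rw [ih (acc ++ [PySem.List.pyGetD acc (-1) 0 + x]) (by simp)]
    simp only [PySem.List.pyGetD_neg_one_append_singleton]
    rw [List.append_assoc]
    congr 1
    simp only [List.length_cons, List.range_succ_eq_map]
    simp [add_assoc, add_comm, add_left_comm]

theorem prefixSums_eq (honeys : List Int) :
    prefixSums honeys = (List.range (honeys.length + 1)).map (pvS honeys) := by
  unfold prefixSums
  rw [foldP honeys [0] (by simp)]
  have h1 : PySem.List.pyGetD [(0:Int)] (-1) 0 = 0 := rfl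
  simp [h1, List.range_succ_eq_map, pvS, Function.comp_def]

theorem pyGetD_prefixSums (honeys : List Int) (i : Int) (h0 : 0 ≤ i) (hL : i ≤ (honeys.length : Int)) :
    PySem.List.pyGetD (prefixSums honeys) i 0 = pvS honeys i.toNat := by
  rw [prefixSums_eq,
    PySem.List.pyGetD_eq_getElem ((List.range (honeys.length + 1)).map (pvS honeys)) 0 h0 (by simp; omega)]
  simp

theorem foldl_max_out (f : Int → Int) :
    ∀ (l : List Int) (r t : Int),
      l.foldl (fun acc i => max acc (f i)) (max r t) = max (l.foldl (fun acc i => max acc (f i)) r) t := by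
  intro l
  induction l with
  | nil => intro r t; rfl
  | cons x xs ih =>
    intro r t
    simp only [List.foldl_cons]
    rw [max_right_comm, ih]

-- A's first loop equals a running max of the closed-form terms
theorem loopA2 (first : Int) (honeys : List Int) :
    ∀ (n : Nat) (r : Int), n ≤ honeys.length →
      (PySem.List.pyRange 1 ((n : Int) + 1) 1).foldl (solveStep2 first honeys) (0, r)
        = (pvS honeys n,
           (PySem.List.pyRange 1 ((n : Int) + 1) 1).foldl
             (fun acc i => max acc (first + pvS honeys i.toNat - PySem.List.pyGetD honeys i 0)) r) := by
  intro n
  induction n with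
  | zero =>
    intro r _
    rw [PySem.List.pyRange_one_eq_nil (by omega)]
    simp [pvS]
  | succ n ih =>
    intro r hn
    have hcast : ((n + 1 : Nat) : Int) + 1 = ((n : Int) + 1) + 1 := by push_cast; ring
    rw [hcast, PySem.List.pyRange_one_succ_right (by omega), List.foldl_append, List.foldl_append,
      ih r (by omega)]
    simp only [List.foldl_cons, List.foldl_nil]
    unfold solveStep2
    have h1 : (n : Int) + 1 - 1 = (n : Int) := by ring
    have h2 : ((n : Int) + 1).toNat = n + 1 := by omega
    rw [h1, h2]
    rw [← pvS_succ honeys n (by omega)]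
    simp only [Prod.mk.injEq]
    refine ⟨trivial, ?_⟩
    split_ifs <;> omega

-- A's second loop (.2 component) equals the forward running max of the closed-form terms
theorem loopA3 (first : Int) (honeys : List Int) (M : Nat) (hM : M ≤ honeys.length) :
    ∀ (n : Nat) (r : Int), n + 2 ≤ M →
      ((PySem.List.pyRange (n : Int) 0 (-1)).foldl (solveStep3 first honeys)
          (pvS honeys M - pvS honeys (n + 2), r)).2
        = (PySem.List.pyRange 1 ((n : Int) + 1) 1).foldl
            (fun acc i => max acc (first + (pvS honeys M - pvS honeys (i.toNat + 1)) - PySem.List.pyGetD honeys i 0)) r := by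
  intro n
  induction n with
  | zero =>
    intro r _
    rw [PySem.List.pyRange_neg_one_eq_nil (by omega), PySem.List.pyRange_one_eq_nil (by omega)]
    rfl
  | succ n ih =>
    intro r hn
    have hc : ((n + 1 : Nat) : Int) = (n : Int) + 1 := by push_cast; ring
    have hcons : PySem.List.pyRange ((n : Int) + 1) 0 (-1)
        = ((n : Int) + 1) :: PySem.List.pyRange ((n : Int) + 1 - 1) 0 (-1) :=
      PySem.List.pyRange_neg_one_cons (by omega)
    have hstep : solveStep3 first honeys (pvS honeys M - pvS honeys (n + 1 + 2), r) ((n : Int) + 1)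
        = (pvS honeys M - pvS honeys (n + 2),
           max r (first + (pvS honeys M - pvS honeys (n + 2)) - PySem.List.pyGetD honeys ((n : Int) + 1) 0)) := by
      have e3 : pvS honeys (n + 1 + 2)
          = pvS honeys (n + 2) + PySem.List.pyGetD honeys ((n : Int) + 1 + 1) 0 := by
        have h := pvS_succ honeys (n + 2) (by omega)
        have hcast2 : ((n + 2 : Nat) : Int) = (n : Int) + 1 + 1 := by push_cast; ring
        rw [hcast2] at h
        exact h
      unfold solveStep3
      rw [e3]
      simp only [Prod.mk.injEq]
      refine ⟨by ring, ?_⟩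
      split_ifs <;> omega
    have hsr : PySem.List.pyRange 1 ((n : Int) + 1 + 1) 1
        = PySem.List.pyRange 1 ((n : Int) + 1) 1 ++ [(n : Int) + 1] :=
      PySem.List.pyRange_one_succ_right (by omega)
    rw [hc, hcons, show (n : Int) + 1 - 1 = (n : Int) by ring]
    simp only [List.foldl_cons]
    rw [hstep, ih _ (by omega), hsr, List.foldl_append]
    simp only [List.foldl_cons, List.foldl_nil]
    rw [show ((n : Int) + 1).toNat = n + 1 by omega,
      foldl_max_out (fun i => first + (pvS honeys M - pvS honeys (i.toNat + 1)) - PySem.List.pyGetD honeys i 0)]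

theorem dropLast_sum (honeys : List Int) :
    honeys.dropLast.sum = pvS honeys (honeys.length - 1) := by
  rw [List.dropLast_eq_take]; rfl

theorem tail_sum (honeys : List Int) (h : honeys ≠ []) :
    honeys.tail.sum = pvS honeys honeys.length - PySem.List.pyGetD honeys 0 0 := by
  cases honeys with
  | nil => exact absurd rfl h
  | cons x xs =>
    have : PySem.List.pyGetD (x :: xs) 0 0 = x := PySem.List.pyGetD_zero_cons x xs 0
    simp [pvS, this]

-- ===== VERDICT (by name: the statement is the Claim_ definition above) =====
theorem solve_spec : Claim_equal_solve := by
  intro N honeys _ hpre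
  obtain ⟨h3, hNL⟩ := hpre
  show solve N honeys = solve_alt N honeys
  simp only [solve, solve_alt]
  by_cases hN : N < 3
  · rw [PySem.List.pyRange_one_eq_nil (show N - 1 ≤ 1 by omega),
      PySem.List.pyRange_neg_one_eq_nil (show N - 2 ≤ 0 by omega)]
    simp [PySem.List.max?_id_cons]
  · set n := (N - 2).toNat with hn
    have hn2 : N - 2 = (n : Int) := by omega
    have hn1 : N - 1 = (n : Int) + 1 := by omega
    rw [hn1, hn2]
    rw [loopA2 _ honeys n 0 (by omega)]
    have hpair : ((0 : Int), (0 : Int)) = (pvS honeys N.toNat - pvS honeys (n + 2), (0 : Int)) := by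
      rw [show n + 2 = N.toNat by omega]; ring_nf
    rw [hpair, loopA3 _ honeys N.toNat (by omega) n 0 (by omega)]
    rw [PySem.List.max?_id_cons, PySem.List.max?_id_cons]
    simp only [Option.getD_some, List.foldl_map]
    have hne : honeys ≠ [] := by cases honeys <;> simp_all
    have hfirst : (PySem.List.slice honeys none (some (-1))).sum = pvS honeys (honeys.length - 1) := by
      rw [PySem.List.slice_to_neg_one, dropLast_sum]
    have hfirst' : (PySem.List.slice honeys (some 1)).sum
        = pvS honeys honeys.length - PySem.List.pyGetD honeys 0 0 := by
      rw [PySem.List.slice_from_one, tail_sum honeys hne]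
    have hPLm1 : PySem.List.pyGetD (prefixSums honeys) ((honeys.length : Int) - 1) 0
        = pvS honeys (honeys.length - 1) := by
      rw [pyGetD_prefixSums honeys _ (by omega) (by omega)]
      congr 1
      omega
    have hPL : PySem.List.pyGetD (prefixSums honeys) ((honeys.length : Int)) 0
        = pvS honeys honeys.length := by
      rw [pyGetD_prefixSums honeys _ (by omega) (by omega)]
      norm_num
    have hPN : PySem.List.pyGetD (prefixSums honeys) N 0 = pvS honeys N.toNat :=
      pyGetD_prefixSums honeys N (by omega) (by omega)
    have hfold2 : (PySem.List.pyRange 1 ((n : Int) + 1) 1).foldl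
          (fun acc i =>
            max acc
              ((PySem.List.slice honeys none (some (-1))).sum + pvS honeys i.toNat - PySem.List.pyGetD honeys i 0)) 0
        = (PySem.List.pyRange 1 ((n : Int) + 1) 1).foldl
          (fun x y =>
            max x
              (PySem.List.pyGetD (prefixSums honeys) ((honeys.length : Int) - 1) 0 +
                  PySem.List.pyGetD (prefixSums honeys) y 0 -
                PySem.List.pyGetD honeys y 0)) 0 := by
      apply PySem.List.foldl_congr_mem
      intro acc x hx
      rw [PySem.List.mem_pyRange_one] at hx
      rw [hfirst, hPLm1, pyGetD_prefixSums honeys x (by omega) (by omega)]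
    have hfold3 : (PySem.List.pyRange 1 ((n : Int) + 1) 1).foldl
          (fun acc i =>
            max acc
              ((PySem.List.slice honeys (some 1)).sum + (pvS honeys N.toNat - pvS honeys (i.toNat + 1)) -
                PySem.List.pyGetD honeys i 0)) 0
        = (PySem.List.pyRange 1 ((n : Int) + 1) 1).foldl
          (fun x y =>
            max x
              (PySem.List.pyGetD (prefixSums honeys) ((honeys.length : Int)) 0 - PySem.List.pyGetD honeys 0 0 +
                  (PySem.List.pyGetD (prefixSums honeys) N 0 - PySem.List.pyGetD (prefixSums honeys) (y + 1) 0) -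
                PySem.List.pyGetD honeys y 0)) 0 := by
      apply PySem.List.foldl_congr_mem
      intro acc x hx
      rw [PySem.List.mem_pyRange_one] at hx
      rw [hfirst', hPL, hPN, pyGetD_prefixSums honeys (x + 1) (by omega) (by omega),
        show (x + 1).toNat = x.toNat + 1 by omega]
    rw [hfold2, hfold3]
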